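-- pv_equiv track=rewrite | github.com/Suchitra1912/coding-challenges | coding_challenge_20/solution.py | display_series_20
-- ===== SOURCE A (Python) =====
-- def display_series_20(n: int) -> list:
--     """
--     Generates a series where each term is the previous term plus an incrementing integer starting from 1.
--
--     Parameters:
--         n (int): The number of terms in the series.
--
--     Returns:
--         list: A list containing the series up to the Nth term.
--     """
--     if n <= 0:
--         raise ValueError("N must be a positive integer.")
--
--     series = []
--     current_value = 1
--     increment = 1
--
--     for _ in range(n):
--         series.append(current_value)
--         current_value += increment
--         increment += 1
--
--     return series
-- ===== SOURCE B (Python) =====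
-- def display_series_20(n: int) -> list:
--     if n <= 0:
--         raise ValueError("N must be a positive integer.")
--     return [1 + i * (i + 1) // 2 for i in range(n)]
-- ===== Notes on version B (the rewrite author's own statement) =====
-- stated objective: idiomatic
-- what changed: Replaces the running-accumulator loop (current_value/increment threaded through each iteration) by a closed-form comprehension computing term i directly as 1 + i*(i+1)//2.
import Mathlib
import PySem

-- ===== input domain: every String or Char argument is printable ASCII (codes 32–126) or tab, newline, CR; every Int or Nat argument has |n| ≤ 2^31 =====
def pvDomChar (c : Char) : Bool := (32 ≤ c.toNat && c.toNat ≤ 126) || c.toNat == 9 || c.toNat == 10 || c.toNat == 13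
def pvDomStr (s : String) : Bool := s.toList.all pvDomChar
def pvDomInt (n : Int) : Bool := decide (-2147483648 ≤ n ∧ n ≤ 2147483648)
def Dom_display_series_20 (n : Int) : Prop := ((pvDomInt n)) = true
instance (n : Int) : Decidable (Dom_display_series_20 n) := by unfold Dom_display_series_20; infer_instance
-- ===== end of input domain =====

-- B replaces A's running-accumulator loop with a closed-form comprehension term(i) = 1 + i*(i+1)//2 (idiomatic).

-- ===== PORT A =====
-- literal port: for _ in range(n): series.append(current_value); current_value += increment; increment += 1
def display_series_20 (n : Int) : List Int :=
  ((PySem.List.pyRange 0 n 1).foldl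
    (fun (st : List Int × Int × Int) _ =>
      (st.1 ++ [st.2.1], st.2.1 + st.2.2, st.2.2 + 1))
    ([], 1, 1)).1

-- ===== PORT B =====
-- literal port of Source B: [1 + i*(i+1)//2 for i in range(n)]
def display_series_20_alt (n : Int) : List Int :=
  (PySem.List.pyRange 0 n 1).map (fun i => 1 + PySem.Int.floordiv (i * (i + 1)) 2)

-- ===== PRECONDITION & SPEC =====
-- A raises ValueError when n <= 0; exactly those inputs are excluded.
def Pre_display_series_20 (n : Int) : Prop := 1 ≤ n
instance (n : Int) : Decidable (Pre_display_series_20 n) := by unfold Pre_display_series_20; infer_instance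
def pvWitness_display_series_20 : Int := 5
def Spec_display_series_20 (n : Int) (out : List Int) : Prop := out = display_series_20_alt n
instance (n : Int) (out : List Int) : Decidable (Spec_display_series_20 n out) := by unfold Spec_display_series_20; infer_instance

-- ===== CLAIM (what is proved, stated in full; the proofs are below) =====
def Claim_equal_display_series_20 : Prop := ∀ (n : Int), Dom_display_series_20 n → Pre_display_series_20 n → Spec_display_series_20 n (display_series_20 n)

-- ===== LEMMAS AND PROOFS =====

def pvF (k : Nat) : Int := 1 + PySem.Int.floordiv ((k : Int) * ((k : Int) + 1)) 2

lemma pvF_eq (k : Nat) : pvF k = 1 + ((k * (k + 1) / 2 : Nat) : Int) := by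
  unfold pvF
  rw [PySem.Int.floordiv_eq_ediv_of_pos (by norm_num)]
  push_cast [Int.natCast_div]
  ring_nf

lemma pvF_step (k : Nat) : pvF k + ((k : Int) + 1) = pvF (k + 1) := by
  rw [pvF_eq, pvF_eq]
  have h2 : (k + 1) * (k + 1 + 1) = k * (k + 1) + 2 * (k + 1) := by ring
  have hN : k * (k + 1) / 2 + (k + 1) = (k + 1) * (k + 1 + 1) / 2 := by omega
  rw [← hN]
  push_cast
  ring

def pvStep (st : List Int × Int × Int) (_ : Int) : List Int × Int × Int :=
  (st.1 ++ [st.2.1], st.2.1 + st.2.2, st.2.2 + 1)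

lemma pvFold (m : Nat) : ∀ (l : List Int), l.length = m →
    l.foldl pvStep ([], 1, 1) = ((List.range m).map pvF, pvF m, (m : Int) + 1) := by
  -- generalized invariant: starting mid-way at index k
  suffices h : ∀ (l : List Int) (k : Nat) (acc : List Int),
      l.foldl pvStep (acc, pvF k, (k : Int) + 1)
        = (acc ++ (List.range l.length).map (fun j => pvF (k + j)), pvF (k + l.length), ((k : Int) + l.length) + 1) by
    intro l hl
    have := h l 0 []
    simpa [hl] using this
  intro l
  induction l with
  | nil => intro k acc; simp
  | cons x xs ih =>
    intro k acc
    simp only [List.foldl_cons, pvStep]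
    have := ih (k + 1) (acc ++ [pvF k])
    rw [show pvF k + ((k : Int) + 1) = pvF (k + 1) from pvF_step k] at *
    rw [show ((k : Int) + 1) + 1 = ((k + 1 : Nat) : Int) + 1 by push_cast; ring]
    rw [this]
    simp only [List.length_cons, List.range_succ_eq_map, List.map_cons, List.map_map,
      Nat.add_zero, List.append_assoc, List.singleton_append, Prod.mk.injEq]
    refine ⟨?_, ?_, ?_⟩
    · congr 1
      congr 1
      apply List.map_congr_left
      intro j _
      simp only [Function.comp]
      congr 1
      omega
    · congr 1
      omega
    · push_cast
      ring

-- ===== VERDICT (by name: the statement is the Claim_ definition above) =====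
theorem display_series_20_spec : Claim_equal_display_series_20 := by
  intro n _ hpre
  unfold Spec_display_series_20 display_series_20 display_series_20_alt
  rw [PySem.List.pyRange_one]
  have hlen : ((List.range (n - 0).toNat).map (fun k : Nat => (0 : Int) + k)).length = (n - 0).toNat := by
    simp
  rw [show (fun (st : List Int × Int × Int) (x : Int) =>
      (st.1 ++ [st.2.1], st.2.1 + st.2.2, st.2.2 + 1)) = pvStep from rfl]
  rw [pvFold _ _ hlen]
  simp [pvF, List.map_map, Function.comp]
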